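-- pv_equiv track=rewrite | github.com/nguyendinhthienloc/Sahur | src/utils.py | tokenize_alpha
-- ===== SOURCE A (Python) =====
-- from typing import List, Dict, Any
--
-- def tokenize_alpha(text: str) -> List[str]:
--     """
--     Simple alpha-only tokenization.
--
--     Returns list of lowercase alphabetic tokens (no punctuation, no numbers).
--     Suitable for lexical diversity and frequency analysis.
--     """
--     if not text:
--         return []
--     tokens = []
--     for word in text.split():
--         clean = ''.join(c for c in word if c.isalpha())
--         if clean:
--             tokens.append(clean.lower())
--     return tokens
-- ===== SOURCE B (Python) =====
-- def tokenize_alpha(text):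
--     """Single-pass character state machine: buffer alpha chars, flush on whitespace."""
--     if not text:
--         return []
--     tokens = []
--     buf = []
--     for c in text:
--         if c.isalpha():
--             buf.append(c)
--         elif c.isspace():
--             if buf:
--                 tokens.append(''.join(buf).lower())
--             buf = []
--         # other chars: dropped, do not split the token
--     if buf:
--         tokens.append(''.join(buf).lower())
--     return tokens
-- ===== Notes on version B (the rewrite author's own statement) =====
-- stated objective: alternative
-- what changed: Replaced split()-then-filter-per-word with a single flat pass over the characters maintaining a buffer that collects alphabetic chars and flushes on whitespace.
import Mathlib
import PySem

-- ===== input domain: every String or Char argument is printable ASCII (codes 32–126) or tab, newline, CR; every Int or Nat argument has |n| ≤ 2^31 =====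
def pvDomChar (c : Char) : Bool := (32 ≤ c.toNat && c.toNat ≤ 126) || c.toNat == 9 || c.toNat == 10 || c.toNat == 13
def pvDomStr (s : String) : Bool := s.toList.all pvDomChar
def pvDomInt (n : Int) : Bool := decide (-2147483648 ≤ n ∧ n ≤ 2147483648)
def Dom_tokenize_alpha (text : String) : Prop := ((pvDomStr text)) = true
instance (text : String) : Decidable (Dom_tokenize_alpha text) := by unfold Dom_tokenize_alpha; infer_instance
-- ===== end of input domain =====

-- B is a single character-level state machine (buffer + flush on whitespace) instead of
-- A's split()-then-per-word-filter; same cost, flatter structure (objective: alternative).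

-- ===== PORT A =====
def tokenize_alpha (text : String) : List String :=
  if text.toList = [] then []
  else
    (PySem.Str.split₀ text).foldl
      (fun tokens word =>
        let clean := String.ofList (word.toList.filter PySem.Chars.isalpha)
        if clean.toList ≠ [] then tokens ++ [PySem.Str.lower clean] else tokens)
      []

-- ===== PORT B =====
def tokFlush (tokens : List String) (buf : List Char) : List String :=
  if buf = [] then tokens
  else tokens ++ [String.ofList (PySem.Chars.lower buf)]

def tokStep (st : List String × List Char) (c : Char) : List String × List Char :=
  if PySem.Chars.isalpha c then (st.1, st.2 ++ [c])
  else if PySem.Chars.isspace c then (tokFlush st.1 st.2, [])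
  else st

def tokenize_alpha_alt (text : String) : List String :=
  if text.toList = [] then []
  else
    let st := text.toList.foldl tokStep ([], [])
    tokFlush st.1 st.2

-- ===== PRECONDITION & SPEC =====
def Spec_tokenize_alpha (text : String) (out : List String) : Prop := out = tokenize_alpha_alt text
instance (text : String) (out : List String) : Decidable (Spec_tokenize_alpha text out) := by unfold Spec_tokenize_alpha; infer_instance

-- ===== CLAIM (what is proved, stated in full; the proofs are below) =====
def Claim_equal_tokenize_alpha : Prop := ∀ (text : String), Dom_tokenize_alpha text → Spec_tokenize_alpha text (tokenize_alpha text)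

-- ===== LEMMAS AND PROOFS =====

-- the per-word step of A's fold, expressed on List Char
def tokAStep (tokens : List String) (w : List Char) : List String :=
  if w.filter PySem.Chars.isalpha ≠ [] then
    tokens ++ [String.ofList (PySem.Chars.lower (w.filter PySem.Chars.isalpha))]
  else tokens

theorem alpha_not_space (c : Char) (h : PySem.Chars.isalpha c = true) :
    PySem.Chars.isspace c = false := by
  simp only [PySem.Chars.isalpha, PySem.Chars.isupper, PySem.Chars.islower, Bool.or_eq_true,
    Bool.and_eq_true, decide_eq_true_eq, Char.le_def, UInt32.le_iff_toNat_le] at h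
  simp only [PySem.Chars.isspace]
  simp only [Bool.or_eq_false_iff, Bool.and_eq_false_iff, decide_eq_false_iff_not, not_le]
  have h2 : c.toNat = c.val.toNat := rfl
  rcases h with ⟨a, b⟩ | ⟨a, b⟩ <;> simp_all <;> omega

theorem go_acc (cs : List Char) (cur : List Char) (acc : List (List Char)) :
    PySem.Chars.split₀.go cs cur acc = acc.reverse ++ PySem.Chars.split₀.go cs cur [] := by
  induction cs generalizing cur acc with
  | nil =>
    show (if cur.isEmpty then acc.reverse else (cur.reverse :: acc).reverse)
        = acc.reverse ++ (if cur.isEmpty then ([] : List (List Char)).reverse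
            else (cur.reverse :: ([] : List (List Char))).reverse)
    by_cases h : cur.isEmpty <;> simp [h]
  | cons c rest ih =>
    show (if PySem.Chars.isspace c then
            (if cur.isEmpty then PySem.Chars.split₀.go rest [] acc
             else PySem.Chars.split₀.go rest [] (cur.reverse :: acc))
          else PySem.Chars.split₀.go rest (c :: cur) acc)
        = acc.reverse ++ (if PySem.Chars.isspace c then
            (if cur.isEmpty then PySem.Chars.split₀.go rest [] []
             else PySem.Chars.split₀.go rest [] (cur.reverse :: []))
          else PySem.Chars.split₀.go rest (c :: cur) [])
    by_cases hs : PySem.Chars.isspace c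
    · by_cases hc : cur.isEmpty
      · simp only [hs, hc, if_true]
        exact ih [] acc
      · simp only [hs, hc, if_true, Bool.false_eq_true, if_false]
        rw [ih [] (cur.reverse :: acc), ih [] [cur.reverse]]
        simp
    · simp only [hs, Bool.false_eq_true, if_false]
      exact ih (c :: cur) acc

theorem flush_eq_astep (tokens : List String) (w : List Char) :
    tokFlush tokens (w.filter PySem.Chars.isalpha) = tokAStep tokens w := by
  unfold tokFlush tokAStep
  by_cases h : w.filter PySem.Chars.isalpha = [] <;> simp [h]

theorem main_inv (cs : List Char) (cur : List Char) (tokens : List String) :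
    tokFlush (cs.foldl tokStep (tokens, cur.reverse.filter PySem.Chars.isalpha)).1
             (cs.foldl tokStep (tokens, cur.reverse.filter PySem.Chars.isalpha)).2
      = (PySem.Chars.split₀.go cs cur []).foldl tokAStep tokens := by
  induction cs generalizing cur tokens with
  | nil =>
    rw [show PySem.Chars.split₀.go [] cur [] =
        (if cur.isEmpty then ([] : List (List Char)).reverse
         else (cur.reverse :: ([] : List (List Char))).reverse) from rfl]
    by_cases h : cur.isEmpty
    · have hc : cur = [] := by simpa [List.isEmpty_iff] using h
      simp [hc, tokFlush]
    · simp only [List.foldl_nil, h, Bool.false_eq_true, if_false, List.reverse_cons,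
        List.reverse_nil, List.nil_append, List.foldl_cons, List.foldl_nil]
      exact flush_eq_astep tokens cur.reverse
  | cons c rest ih =>
    rw [show PySem.Chars.split₀.go (c :: rest) cur [] =
        (if PySem.Chars.isspace c then
            (if cur.isEmpty then PySem.Chars.split₀.go rest [] []
             else PySem.Chars.split₀.go rest [] (cur.reverse :: []))
          else PySem.Chars.split₀.go rest (c :: cur) []) from rfl]
    simp only [List.foldl_cons]
    by_cases ha : PySem.Chars.isalpha c
    · have hs := alpha_not_space c ha
      have hbuf : cur.reverse.filter PySem.Chars.isalpha ++ [c]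
          = (c :: cur).reverse.filter PySem.Chars.isalpha := by
        simp [List.filter_append, ha]
      rw [show tokStep (tokens, cur.reverse.filter PySem.Chars.isalpha) c
          = (tokens, cur.reverse.filter PySem.Chars.isalpha ++ [c]) by
        simp [tokStep, ha]]
      rw [hbuf, hs]
      simp only [Bool.false_eq_true, if_false]
      exact ih (c :: cur) tokens
    · by_cases hs : PySem.Chars.isspace c
      · rw [show tokStep (tokens, cur.reverse.filter PySem.Chars.isalpha) c
            = (tokFlush tokens (cur.reverse.filter PySem.Chars.isalpha), []) by
          simp [tokStep, ha, hs]]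
        rw [hs]
        simp only [if_true]
        by_cases hc : cur.isEmpty
        · have hcur : cur = [] := by simpa [List.isEmpty_iff] using hc
          simp only [hc, if_true]
          have := ih ([] : List Char) tokens
          simp only [List.reverse_nil, List.filter_nil] at this
          rw [← this]
          simp [hcur, tokFlush]
        · simp only [hc, Bool.false_eq_true, if_false]
          rw [go_acc rest [] [cur.reverse]]
          simp only [List.reverse_cons, List.reverse_nil, List.nil_append, List.foldl_append,
            List.foldl_cons, List.foldl_nil]
          have := ih ([] : List Char) (tokFlush tokens (cur.reverse.filter PySem.Chars.isalpha))
          simp only [List.reverse_nil, List.filter_nil] at this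
          rw [this, flush_eq_astep]
      · have hbuf : cur.reverse.filter PySem.Chars.isalpha
            = (c :: cur).reverse.filter PySem.Chars.isalpha := by
          simp [List.filter_append, ha]
        rw [show tokStep (tokens, cur.reverse.filter PySem.Chars.isalpha) c
            = (tokens, cur.reverse.filter PySem.Chars.isalpha) by
          simp [tokStep, ha, hs]]
        have hs' : PySem.Chars.isspace c = false := by simpa using hs
        rw [hs', hbuf]
        simp only [Bool.false_eq_true, if_false]
        exact ih (c :: cur) tokens

-- ===== VERDICT (by name: the statement is the Claim_ definition above) =====
theorem tokenize_alpha_spec : Claim_equal_tokenize_alpha := by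
  intro text _
  unfold Spec_tokenize_alpha tokenize_alpha tokenize_alpha_alt
  by_cases h : text.toList = []
  · simp [h]
  · simp only [h, if_false]
    rw [PySem.Str.split₀]
    rw [List.foldl_map]
    have hstep : (fun (tokens : List String) (w : List Char) =>
        (fun tokens word =>
          let clean := String.ofList (List.filter PySem.Chars.isalpha word.toList)
          if clean.toList ≠ [] then tokens ++ [PySem.Str.lower clean] else tokens)
          tokens (String.ofList w)) = tokAStep := by
      funext tokens w
      simp only [String.toList_ofList, tokAStep, PySem.Str.lower, ne_eq]
    rw [hstep]
    have := main_inv text.toList ([] : List Char) ([] : List String)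
    simp only [List.reverse_nil, List.filter_nil] at this
    rw [show PySem.Chars.split₀ text.toList = PySem.Chars.split₀.go text.toList [] [] from rfl]
    exact this.symm
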